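-- pv_equiv track=rewrite | github.com/DominikBobos/VUT-FIT-IBT | scripts/ArrayFromFeatures.py | GetOneFolderDeep
-- ===== SOURCE A (Python) =====
-- def GetOneFolderDeep(file, folder_extension):
--     processed = ''
--     folders = file.split('/')
--     for idx, folder in enumerate(folders):
--         if idx == len(folders)-2: #the last but one item (folder to append deeper folder)
--             processed += folder + '/' + folder + folder_extension + '/'
--             continue
--         if idx == len(folders)-1: #the last one (file)
--             processed += folder #filename
--             continue
--         processed += folder + '/'
--     return processed
-- ===== SOURCE B (Python) =====
-- def GetOneFolderDeep(file, folder_extension):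
--     folders = file.split('/')
--     if len(folders) >= 2:
--         folders.insert(-1, folders[-2] + folder_extension)
--     return '/'.join(folders)
-- ===== Notes on version B (the rewrite author's own statement) =====
-- stated objective: simpler
-- what changed: Replaces the index-comparing accumulation loop over enumerate with a split / insert of the duplicated parent segment / single join.
import Mathlib
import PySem

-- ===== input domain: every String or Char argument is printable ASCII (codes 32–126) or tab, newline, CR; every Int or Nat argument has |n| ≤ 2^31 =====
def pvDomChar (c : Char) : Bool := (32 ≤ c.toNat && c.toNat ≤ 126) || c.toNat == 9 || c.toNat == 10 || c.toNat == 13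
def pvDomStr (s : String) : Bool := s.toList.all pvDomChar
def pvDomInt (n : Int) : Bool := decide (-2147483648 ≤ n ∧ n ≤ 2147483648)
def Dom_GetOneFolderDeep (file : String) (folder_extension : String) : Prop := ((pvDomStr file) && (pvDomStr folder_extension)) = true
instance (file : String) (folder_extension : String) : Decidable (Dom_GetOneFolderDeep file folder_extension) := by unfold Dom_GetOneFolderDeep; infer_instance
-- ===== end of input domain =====

-- B replaces A's index-comparing accumulation loop with split / insert of the duplicated parent segment / join (objective: simpler).
-- ===== PORT A =====
-- processed += … on strings is ported on List Char (PySem.Chars), exact; file.split('/') is PySem.Chars.splitOn.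
def GetOneFolderDeep (file : String) (folder_extension : String) : String :=
  let folders := PySem.Chars.splitOn file.toList ['/']
  let n : Int := folders.length
  String.ofList ((PySem.List.enumerate folders 0).foldl (fun processed p =>
    if p.1 = n - 2 then processed ++ p.2 ++ ['/'] ++ p.2 ++ folder_extension.toList ++ ['/']
    else if p.1 = n - 1 then processed ++ p.2
    else processed ++ p.2 ++ ['/']) [])

-- ===== PORT B =====
-- folders.insert(-1, folders[-2] + folder_extension) is PySem.List.insert at -1 with PySem.List.pyGetD at -2; '/'.join is PySem.Chars.join.
def GetOneFolderDeep_alt (file : String) (folder_extension : String) : String :=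
  let folders := PySem.Chars.splitOn file.toList ['/']
  let folders2 :=
    if 2 ≤ folders.length then
      PySem.List.insert folders (-1) (PySem.List.pyGetD folders (-2) [] ++ folder_extension.toList)
    else folders
  String.ofList (PySem.Chars.join ['/'] folders2)

-- ===== PRECONDITION & SPEC =====
def Spec_GetOneFolderDeep (file : String) (folder_extension : String) (out : String) : Prop := out = GetOneFolderDeep_alt file folder_extension
instance (file : String) (folder_extension : String) (out : String) : Decidable (Spec_GetOneFolderDeep file folder_extension out) := by unfold Spec_GetOneFolderDeep; infer_instance

-- ===== CLAIM (what is proved, stated in full; the proofs are below) =====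
def Claim_equal_GetOneFolderDeep : Prop := ∀ (file : String) (folder_extension : String), Dom_GetOneFolderDeep file folder_extension → Spec_GetOneFolderDeep file folder_extension (GetOneFolderDeep file folder_extension)

-- ===== LEMMAS AND PROOFS =====

-- '/'.join of ys ++ [a, b, c]
theorem join_append_three (ys : List (List Char)) (a b c : List Char) :
    PySem.Chars.join ['/'] (ys ++ [a, b, c]) =
      (ys.map (· ++ ['/'])).flatten ++ a ++ ['/'] ++ b ++ ['/'] ++ c := by
  induction ys with
  | nil => simp [PySem.Chars.join_cons_cons, PySem.Chars.join_singleton]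
  | cons x xs ih =>
    cases xs with
    | nil => simp [PySem.Chars.join_cons_cons]
    | cons y ys' => simp [PySem.Chars.join_cons_cons] at ih ⊢; simp [ih]

-- A's loop over the leading segments (all indices < n-2) appends segment ++ '/'
theorem foldl_lead (folder_extension : String) (ys : List (List Char)) (n : Int) (s : Int) (acc : List Char)
    (h : ∀ k : Nat, (k : Int) < ys.length → s + k < n - 2) :
    (PySem.List.enumerate ys s).foldl (fun processed p =>
        if p.1 = n - 2 then processed ++ p.2 ++ ['/'] ++ p.2 ++ folder_extension.toList ++ ['/']
        else if p.1 = n - 1 then processed ++ p.2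
        else processed ++ p.2 ++ ['/']) acc
      = acc ++ (ys.map (· ++ ['/'])).flatten := by
  induction ys generalizing s acc with
  | nil => simp [PySem.List.enumerate_nil]
  | cons y ys ih =>
    have h0 : s < n - 2 := by have := h 0 (by simp); simpa using this
    rw [PySem.List.enumerate_cons]
    simp only [List.foldl_cons]
    rw [if_neg (by omega), if_neg (by omega)]
    rw [ih (s + 1) _ (by
      intro k hk
      have h2 := h (k + 1) (by simp only [List.length_cons]; push_cast at hk ⊢; omega)
      push_cast at h2 ⊢
      omega)]
    simp

theorem insert_neg_one (ys : List (List Char)) (y z v : List Char) :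
    PySem.List.insert (ys ++ [y, z]) (-1) v = ys ++ [y, v, z] := by
  have hk : (PySem.List.sliceIndices ((ys ++ [y, z]).length) (some (-1)) none 1).1.toNat
      = ys.length + 1 := by
    simp [PySem.List.sliceIndices]
    omega
  simp only [PySem.List.insert, hk]
  rw [List.take_append, List.drop_append,
      List.take_of_length_le (by omega), List.drop_of_length_le (by omega)]
  simp

theorem pyGetD_neg_two (ys : List (List Char)) (y z : List Char) :
    PySem.List.pyGetD (ys ++ [y, z]) (-2) [] = y := by
  simp [PySem.List.pyGetD, PySem.List.pyGet?, PySem.List.pyIdx?]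

-- the two programs agree on an arbitrary segment list
theorem main_list (folder_extension : String) (folders : List (List Char)) :
    (PySem.List.enumerate folders 0).foldl (fun processed p =>
        if p.1 = (folders.length : Int) - 2 then
          processed ++ p.2 ++ ['/'] ++ p.2 ++ folder_extension.toList ++ ['/']
        else if p.1 = (folders.length : Int) - 1 then processed ++ p.2
        else processed ++ p.2 ++ ['/']) []
      = PySem.Chars.join ['/']
          (if 2 ≤ folders.length then
            PySem.List.insert folders (-1)
              (PySem.List.pyGetD folders (-2) [] ++ folder_extension.toList)
          else folders) := by
  by_cases h2 : 2 ≤ folders.length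
  · obtain ⟨ys', z, hz⟩ := (List.eq_nil_or_concat folders).resolve_left (by
      intro h; rw [h] at h2; simp at h2)
    obtain ⟨ys, y, hy⟩ := (List.eq_nil_or_concat ys').resolve_left (by
      intro h; rw [h] at hz; rw [hz] at h2; simp at h2)
    have hfolders : folders = ys ++ [y, z] := by rw [hz, hy]; simp
    subst hfolders
    rw [if_pos h2, insert_neg_one, pyGetD_neg_two, join_append_three]
    rw [PySem.List.enumerate_append, List.foldl_append]
    rw [foldl_lead folder_extension ys _ 0 [] (by intro k hk; simp; omega)]
    rw [PySem.List.enumerate_cons, PySem.List.enumerate_cons, PySem.List.enumerate_nil]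
    simp only [List.foldl_cons, List.foldl_nil, List.nil_append, List.length_append,
      List.length_cons, List.length_nil]
    split_ifs <;> push_cast at * <;> first | omega | simp
  · rw [if_neg h2]
    match folders, h2 with
    | [], _ => simp [PySem.List.enumerate_nil, PySem.Chars.join_nil]
    | [w], _ =>
      rw [PySem.List.enumerate_cons, PySem.List.enumerate_nil]
      simp [PySem.Chars.join_singleton]
    | _ :: _ :: _, h2 => simp at h2

-- ===== VERDICT (by name: the statement is the Claim_ definition above) =====
theorem GetOneFolderDeep_spec : Claim_equal_GetOneFolderDeep := by
  intro file folder_extension _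
  unfold Spec_GetOneFolderDeep GetOneFolderDeep GetOneFolderDeep_alt
  exact congrArg String.ofList (main_list folder_extension (PySem.Chars.splitOn file.toList ['/']))
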